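-- pv_equiv track=rewrite | github.com/johnwei0325/CVSD_2025_FINAL_BCH | CVSD_final/BCH-codes/analyze_llr_inputs.py | parse_llr_rows_to_codeword
-- ===== SOURCE A (Python) =====
-- def parse_8bit_signed_llr(llr_8bits):
--     """
--     Parse an 8-bit signed integer LLR value.
--
--     :param llr_8bits: 8-bit binary string or integer
--     :returns: Signed integer value (-128 to 127)
--     """
--     if isinstance(llr_8bits, str):
--         value = int(llr_8bits, 2)
--     else:
--         value = llr_8bits
--
--     # Convert to signed 8-bit integer (two's complement)
--     if value & 0x80:  # MSB is set (negative)
--         return value - 256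
--     else:
--         return value
--
-- def llr_to_hard_decision(llr_value):
--     """
--     Convert LLR value to hard decision bit.
--     - LLR > 0 (positive) -> favor bit 0
--     - LLR < 0 (negative) -> favor bit 1
--     - LLR == 0 -> favor bit 0 (default)
--
--     :param llr_value: Signed integer LLR value
--     :returns: Hard decision bit (0 or 1)
--     """
--     return 1 if llr_value < 0 else 0
--
-- def parse_llr_rows_to_codeword(llr_rows, n=63):
--     """
--     Parse LLR rows into a codeword.
--
--     Each row contains 8 LLR values (8 bits each = 64 bits per row).
--     LLR order: LLR0 (don't care), LLR1 (X^(n-1)), LLR2 (X^(n-2)), ..., LLR63 (X^0)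
--
--     :param llr_rows: List of rows, each row is 64 bits (8 LLR values)
--     :param n: Codeword length
--     :returns: Integer representing the hard decision codeword
--     """
--     # Concatenate all bits from rows
--     all_bits = ''.join(llr_rows)
--
--     # Parse into 8-bit LLR values
--     llr_values = []
--     for i in range(0, len(all_bits), 8):
--         llr_8bits_str = all_bits[i:i+8]
--         if len(llr_8bits_str) == 8:
--             llr_signed = parse_8bit_signed_llr(llr_8bits_str)
--             llr_values.append(llr_signed)
--
--     # We need n+1 LLR values (LLR0 to LLRn)
--     # LLR0 is don't care, so we use LLR1 to LLR63
--     if len(llr_values) < n + 1: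
--         raise ValueError(f"Not enough LLR values: need {n+1}, got {len(llr_values)}")
--
--     # Convert LLR values to hard decisions
--     # LLR1 corresponds to X^(n-1) (MSB), LLR63 corresponds to X^0 (LSB)
--     hard_decisions = []
--     for i in range(1, n + 1):  # Skip LLR0, use LLR1 to LLR63
--         hard_bit = llr_to_hard_decision(llr_values[i])
--         hard_decisions.append(hard_bit)
--
--     # Convert to integer: MSB first (LLR1) to LSB last (LLR63)
--     codeword = 0
--     for i, bit in enumerate(hard_decisions):
--         codeword |= (bit << (n - 1 - i))  # LLR1 is MSB (position n-1), LLR63 is LSB (position 0)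
--
--     return codeword, llr_values
-- ===== SOURCE B (Python) =====
-- def parse_llr_rows_to_codeword(llr_rows, n=63):
--     """
--     Re-implementation: peel complete 8-bit chunks off the front of the joined
--     bit string, read each LLR as int(chunk,2) minus 256 when the sign bit (the
--     chunk's first character) is set, and accumulate the codeword by Horner's
--     rule from the same sign bits.
--     """
--     bits = ''.join(llr_rows)
--     chunks = []
--     while len(bits) >= 8:
--         chunks.append(bits[:8])
--         bits = bits[8:]
--     llr_values = [int(c, 2) - 256 * (c[0] == '1') for c in chunks]
--     if len(llr_values) < n + 1:
--         raise ValueError(f"Not enough LLR values: need {n+1}, got {len(llr_values)}")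
--     codeword = 0
--     for i in range(1, n + 1):
--         codeword = 2 * codeword + (1 if chunks[i][0] == '1' else 0)
--     return codeword, llr_values
-- ===== Notes on version B (the rewrite author's own statement) =====
-- stated objective: simpler
-- what changed: B peels complete 8-bit chunks off the front of the joined string instead of A's stride-8 range/slice scan with a length filter, reads each hard-decision bit directly from the chunk's leading sign character instead of parsing to a signed value and testing its sign, and accumulates the codeword by Horner's rule instead of A's positioned shift-OR over enumerate.
-- outside the precondition, e.g. on parse_llr_rows_to_codeword(['-1111111', '11111111'], 1): A returns (1, [-383, -1]), B returns (1, [-127, -1]); on parse_llr_rows_to_codeword([' 1010101'], 0): A returns (0, [85]), B returns (0, [85])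
import Mathlib
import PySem

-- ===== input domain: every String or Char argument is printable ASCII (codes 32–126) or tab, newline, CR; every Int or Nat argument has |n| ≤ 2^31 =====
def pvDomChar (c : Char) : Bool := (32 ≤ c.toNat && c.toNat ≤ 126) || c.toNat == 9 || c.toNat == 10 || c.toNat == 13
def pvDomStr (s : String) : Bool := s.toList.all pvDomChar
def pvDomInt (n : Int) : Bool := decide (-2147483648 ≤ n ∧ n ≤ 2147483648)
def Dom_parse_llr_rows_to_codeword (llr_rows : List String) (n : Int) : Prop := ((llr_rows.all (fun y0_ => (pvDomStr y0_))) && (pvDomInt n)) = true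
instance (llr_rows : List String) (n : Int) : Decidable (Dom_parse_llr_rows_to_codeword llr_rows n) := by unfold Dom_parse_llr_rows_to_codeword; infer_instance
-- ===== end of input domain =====

-- B replaces A's range/slice scan + signed-parse/sign-test/shift-OR accumulation by peeling 8-char
-- chunks off the front and reading the hard-decision bit directly from each chunk's sign character,
-- accumulating the codeword by Horner's rule (objective: simpler).

-- ===== PORT A =====
-- parse_8bit_signed_llr (str branch only: A always passes a str).  int(s, 2) is
-- PySem.Int.ofCharsBase?; `none` (ValueError) is excluded by Pre_, `.getD 0` is unreachable there.
def pvParse8 (cs : List Char) : Int :=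
  let value : Int := (PySem.Int.ofCharsBase? cs 2).getD 0
  if PySem.Int.band value 128 ≠ 0 then value - 256 else value

-- llr_to_hard_decision
def pvHard (v : Int) : Int := if v < 0 then 1 else 0

-- the `for i in range(0, len(all_bits), 8)` parsing loop of A
def pvLlrA (l : List Char) : List Int :=
  (PySem.List.pyRange 0 l.length 8).foldl
    (fun acc i =>
      let cs := PySem.List.slice l (some i) (some (i + 8))
      if cs.length = 8 then acc ++ [pvParse8 cs] else acc) []

def parse_llr_rows_to_codeword (llr_rows : List String) (n : Int) : Int × List Int :=
  let l := (PySem.Str.join "" llr_rows).toList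
  let llr_values := pvLlrA l
  -- the `raise ValueError` when len(llr_values) < n+1, and the IndexError-free indexing
  -- llr_values[i], are guaranteed away by Pre_ (pyGetD's default is unreachable under Pre_)
  let hard := (PySem.List.pyRange 1 (n + 1) 1).foldl
    (fun acc i => acc ++ [pvHard (PySem.List.pyGetD llr_values i 0)]) []
  -- bit << (n - 1 - i): on every executed iteration i < n, so n - 1 - i ≥ 0 and .toNat is exact
  let codeword := (PySem.List.enumerate hard 0).foldl
    (fun c p => PySem.Int.bor c (Int.shiftLeft p.2 (n - 1 - p.1).toNat)) (0 : Int)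
  (codeword, llr_values)

-- ===== PORT B =====
-- the `while len(bits) >= 8` peeling loop of B
def pvChunks8 (l : List Char) : List (List Char) :=
  if 8 ≤ l.length then l.take 8 :: pvChunks8 (l.drop 8) else []
termination_by l.length
decreasing_by simp; omega

-- int(c, 2) - 256 * (c[0] == '1'); chunks are nonempty so c[0] never raises (pyGetD default unreachable)
def pvSigned8 (cs : List Char) : Int :=
  (PySem.Int.ofCharsBase? cs 2).getD 0 - 256 * (if PySem.List.pyGetD cs 0 ' ' = '1' then 1 else 0)

def parse_llr_rows_to_codeword_alt (llr_rows : List String) (n : Int) : Int × List Int :=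
  let l := (PySem.Str.join "" llr_rows).toList
  let chunks := pvChunks8 l
  let llr_values := chunks.map pvSigned8
  -- Horner loop: codeword = 2*codeword + (1 if chunks[i][0] == '1' else 0); indexing safe under Pre_
  let codeword := (PySem.List.pyRange 1 (n + 1) 1).foldl
    (fun c i =>
      2 * c + (if PySem.List.pyGetD (PySem.List.pyGetD chunks i []) 0 ' ' = '1' then 1 else 0)) (0 : Int)
  (codeword, llr_values)

-- ===== PRECONDITION & SPEC =====
-- Pre_ requires every character of every COMPLETE 8-bit chunk of the joined rows to be '0'/'1'
-- (elsewhere int(chunk, 2) normally raises ValueError, and the few exotic chunks that still parse —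
-- with whitespace, a sign or a '0b' prefix — are outside the documented bit-row format), and enough
-- complete chunks (len(llr_values) ≥ n+1), where A otherwise raises ValueError.
def Pre_parse_llr_rows_to_codeword (llr_rows : List String) (n : Int) : Prop :=
  (((llr_rows.map String.toList).flatten.take
      (8 * ((llr_rows.map String.toList).flatten.length / 8))).all
    (fun c => c == '0' || c == '1')) = true ∧
  n + 1 ≤ ((((llr_rows.map String.toList).flatten.length / 8 : Nat) : Int))
instance (llr_rows : List String) (n : Int) : Decidable (Pre_parse_llr_rows_to_codeword llr_rows n) := by
  unfold Pre_parse_llr_rows_to_codeword; infer_instance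

def pvWitness_parse_llr_rows_to_codeword : List String × Int := (["10000000"], 0)

def Spec_parse_llr_rows_to_codeword (llr_rows : List String) (n : Int) (out : Int × List Int) : Prop :=
  out = parse_llr_rows_to_codeword_alt llr_rows n
instance (llr_rows : List String) (n : Int) (out : Int × List Int) : Decidable (Spec_parse_llr_rows_to_codeword llr_rows n out) := by
  unfold Spec_parse_llr_rows_to_codeword; infer_instance

-- ===== CLAIM (what is proved, stated in full; the proofs are below) =====
def Claim_equal_parse_llr_rows_to_codeword : Prop := ∀ (llr_rows : List String) (n : Int), Dom_parse_llr_rows_to_codeword llr_rows n → Pre_parse_llr_rows_to_codeword llr_rows n → Spec_parse_llr_rows_to_codeword llr_rows n (parse_llr_rows_to_codeword llr_rows n)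

-- ===== LEMMAS AND PROOFS =====

-- ''+''.join(rows) is the concatenation of the rows
theorem pv_join_empty (xss : List (List Char)) : PySem.Chars.join [] xss = xss.flatten := by
  induction xss with
  | nil => simp [PySem.Chars.join_nil]
  | cons x xs ih =>
    cases xs with
    | nil => simp [PySem.Chars.join_singleton]
    | cons y ys =>
      rw [PySem.Chars.join_cons_cons, ih]
      simp

theorem pv_join_flatten (rows : List String) :
    (PySem.Str.join "" rows).toList = (rows.map String.toList).flatten := by
  rw [PySem.Str.toList_join]
  have : ("" : String).toList = [] := rfl
  rw [this, pv_join_empty]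

-- every chunk has 8 characters
theorem pv_chunks_mem8 (l : List Char) : ∀ cs ∈ pvChunks8 l, cs.length = 8 := by
  rw [pvChunks8]
  split
  · intro cs hcs
    rcases List.mem_cons.mp hcs with h | h
    · subst h; simp; omega
    · exact pv_chunks_mem8 (l.drop 8) cs h
  · simp
termination_by l.length
decreasing_by simp; omega

-- the chunks concatenate to the complete-chunk prefix of l
theorem pv_chunks_flatten (l : List Char) :
    (pvChunks8 l).flatten = l.take (8 * (l.length / 8)) := by
  rw [pvChunks8]
  split
  · rename_i h8
    rw [List.flatten_cons, pv_chunks_flatten (l.drop 8), List.length_drop]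
    rw [show 8 * (l.length / 8) = 8 + 8 * ((l.length - 8) / 8) from by omega]
    rw [List.take_add]
  · rename_i h8
    have h0 : l.length / 8 = 0 := by omega
    simp [h0]
termination_by l.length
decreasing_by simp; omega

-- number of chunks
theorem pv_chunks_len (l : List Char) : (pvChunks8 l).length = l.length / 8 := by
  rw [pvChunks8]
  split
  · have := pv_chunks_len (l.drop 8)
    simp [this]
    omega
  · simp
    omega
termination_by l.length
decreasing_by simp; omega

-- A's parsing loop produces exactly the parses of B's chunks
theorem pv_llrA_aux : ∀ (c : Nat) (l : List Char) (acc : List Int), c = (l.length + 7) / 8 →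
    (List.range c).foldl
        (fun acc k =>
          let cs := PySem.List.slice l (some ((8 * k : Nat) : Int)) (some (((8 * k : Nat) : Int) + 8))
          if cs.length = 8 then acc ++ [pvParse8 cs] else acc) acc
      = acc ++ (pvChunks8 l).map pvParse8 := by
  intro c
  induction c with
  | zero =>
    intro l acc hc
    have hl : l.length = 0 := by omega
    rw [List.length_eq_zero_iff] at hl
    subst hl
    rw [pvChunks8]
    simp
  | succ c ih =>
    intro l acc hc
    rw [List.range_succ_eq_map]
    simp only [List.foldl_cons, List.foldl_map]
    have t : PySem.List.slice l none (some (8 : Int)) = List.take 8 l := by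
      simpa using PySem.List.slice_to l (b := 8) (by norm_num)
    by_cases h8 : 8 ≤ l.length
    · have hfull : (List.take 8 l).length = 8 := by simp; omega
      rw [pvChunks8, if_pos h8]
      simp only [Nat.succ_eq_add_one, Nat.mul_zero, Nat.cast_zero, PySem.List.slice_zero_start,
        zero_add, t]
      rw [if_pos hfull]
      rw [PySem.List.foldl_congr_mem (List.range c) _
        (fun a k =>
          let cs := PySem.List.slice (l.drop 8) (some ((8 * k : Nat) : Int)) (some (((8 * k : Nat) : Int) + 8))
          if cs.length = 8 then a ++ [pvParse8 cs] else a)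
        (acc ++ [pvParse8 (List.take 8 l)])
        (by
          intro a k _
          have h1 := PySem.List.slice_natCast_add l (8 * (k + 1)) 8
          have h2 := PySem.List.slice_natCast_add (l.drop 8) (8 * k) 8
          rw [List.drop_drop] at h2
          rw [show 8 + 8 * k = 8 * (k + 1) from by ring] at h2
          simp only [Nat.cast_ofNat] at h1 h2
          simp only [h1, h2])]
      rw [ih (l.drop 8) _ (by simp; omega)]
      simp
    · have hc0 : c = 0 := by omega
      subst hc0
      have hnf : ¬ (List.take 8 l).length = 8 := by simp; omega
      rw [pvChunks8, if_neg h8]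
      simp only [Nat.mul_zero, Nat.cast_zero, PySem.List.slice_zero_start, zero_add, t,
        List.range_zero, List.foldl_nil, List.map_nil, List.append_nil]
      rw [if_neg hnf]

theorem pv_llrA_eq (l : List Char) : pvLlrA l = (pvChunks8 l).map pvParse8 := by
  unfold pvLlrA
  rw [PySem.List.pyRange_of_pos _ _ (by norm_num : (0:Int) < 8)]
  have hcnt : (if (0:Int) < (l.length : Int) then ((((l.length : Int)) - 0 + 8 - 1) / 8).toNat else 0)
      = (l.length + 7) / 8 := by
    split
    · omega
    · omega
  rw [hcnt, List.foldl_map]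
  rw [PySem.List.foldl_congr_mem (List.range ((l.length + 7) / 8)) _
    (fun a k =>
      let cs := PySem.List.slice l (some ((8 * k : Nat) : Int)) (some (((8 * k : Nat) : Int) + 8))
      if cs.length = 8 then a ++ [pvParse8 cs] else a)
    ([] : List Int)
    (by
      intro a k _
      have : (0 : Int) + 8 * (k : Int) = ((8 * k : Nat) : Int) := by push_cast; ring
      simp only [this])]
  have := pv_llrA_aux ((l.length + 7) / 8) l [] rfl
  simpa using this

-- on an 8-character binary chunk, A's two's-complement parse agrees with B's, and
-- its sign is read off the leading character
theorem pv_parse8_bin (cs : List Char) (h8 : cs.length = 8)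
    (hb : ∀ c ∈ cs, c = '0' ∨ c = '1') :
    pvParse8 cs = pvSigned8 cs ∧ (pvParse8 cs < 0 ↔ PySem.List.pyGetD cs 0 ' ' = '1') := by
  rcases cs with _ | ⟨a0, _ | ⟨a1, _ | ⟨a2, _ | ⟨a3, _ | ⟨a4, _ | ⟨a5, _ | ⟨a6, _ | ⟨a7, _ | ⟨a8, tl⟩⟩⟩⟩⟩⟩⟩⟩⟩ <;>
    simp only [List.length] at h8 <;> try omega
  have b0 := hb a0 (by simp); have b1 := hb a1 (by simp); have b2 := hb a2 (by simp)
  have b3 := hb a3 (by simp); have b4 := hb a4 (by simp); have b5 := hb a5 (by simp)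
  have b6 := hb a6 (by simp); have b7 := hb a7 (by simp)
  clear hb h8
  rcases b0 with rfl | rfl <;> rcases b1 with rfl | rfl <;> rcases b2 with rfl | rfl <;>
    rcases b3 with rfl | rfl <;> rcases b4 with rfl | rfl <;> rcases b5 with rfl | rfl <;>
    rcases b6 with rfl | rfl <;> rcases b7 with rfl | rfl <;> exact (by decide)

theorem pv_two_mul_lor (a bn : Nat) (hb : bn ≤ 1) : 2 * a ||| bn = 2 * a + bn := by
  interval_cases bn
  · simp
  · have := Nat.lor_bit false a true 0; simpa [Nat.bit] using this

-- A's shift-OR accumulation over MSB-first 0/1 bits is Horner's rule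
theorem pv_orfold (n : Int) (bs : List Int) : ∀ (k a : Nat),
    (∀ b ∈ bs, b = 0 ∨ b = 1) → (k : Int) + bs.length = n →
    (PySem.List.enumerate bs (k : Int)).foldl
        (fun c p => PySem.Int.bor c (Int.shiftLeft p.2 (n - 1 - p.1).toNat)) ((a : Int) * 2 ^ bs.length)
      = bs.foldl (fun c b => 2 * c + b) (a : Int) := by
  induction bs with
  | nil =>
    intro k a hb hn
    simp [PySem.List.enumerate_nil]
  | cons b rest ih =>
    intro k a hb hn
    simp only [List.length_cons, Nat.cast_add, Nat.cast_one] at hn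
    obtain ⟨bn, hbn, rfl⟩ : ∃ bn : Nat, bn ≤ 1 ∧ b = (bn : Int) := by
      rcases hb b List.mem_cons_self with rfl | rfl
      · exact ⟨0, by norm_num, by norm_num⟩
      · exact ⟨1, le_refl 1, by norm_num⟩
    rw [PySem.List.enumerate_cons]
    simp only [List.foldl_cons, List.length_cons]
    have he : (n - 1 - (k : Int)).toNat = rest.length := by omega
    have key : PySem.Int.bor ((a : Int) * 2 ^ (rest.length + 1))
        (Int.shiftLeft ((bn : Nat) : Int) (n - 1 - (k : Int)).toNat)
        = ((2 * a + bn : Nat) : Int) * 2 ^ rest.length := by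
      rw [he]
      have s1 : Int.shiftLeft ((bn : Nat) : Int) rest.length = ((bn <<< rest.length : Nat) : Int) := by
        exact_mod_cast rfl
      have s2 : ((a : Int)) * 2 ^ (rest.length + 1) = (((a * 2 ^ (rest.length + 1)) : Nat) : Int) := by
        push_cast; ring
      rw [s1, s2, PySem.Int.bor_natCast]
      have s3 : a * 2 ^ (rest.length + 1) = (2 * a) <<< rest.length := by
        rw [Nat.shiftLeft_eq]; ring
      rw [s3, ← Nat.shiftLeft_or_distrib, pv_two_mul_lor a bn hbn, Nat.shiftLeft_eq]
      push_cast
      ring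
    rw [key]
    have hk1 : (k : Int) + 1 = ((k + 1 : Nat) : Int) := by push_cast; ring
    rw [hk1]
    rw [ih (k + 1) (2 * a + bn) (fun x hx => hb x (List.mem_cons_of_mem _ hx))
      (by push_cast; omega)]
    congr 1

-- ===== VERDICT (by name: the statement is the Claim_ definition above) =====
theorem parse_llr_rows_to_codeword_spec : Claim_equal_parse_llr_rows_to_codeword := by
  intro rows n _ hpre
  unfold Spec_parse_llr_rows_to_codeword
  obtain ⟨hbin0, hcount⟩ := hpre
  simp only [parse_llr_rows_to_codeword, parse_llr_rows_to_codeword_alt]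
  set l := (PySem.Str.join "" rows).toList with hl
  have hlf : l = (rows.map String.toList).flatten := pv_join_flatten rows
  clear_value l
  have hcount' : n + 1 ≤ ((pvChunks8 l).length : Int) := by
    rw [pv_chunks_len l, hlf]; exact hcount
  have hbinc : ∀ cs ∈ pvChunks8 l, ∀ c ∈ cs, c = '0' ∨ c = '1' := by
    intro cs hcs c hc
    have hm : c ∈ (pvChunks8 l).flatten := List.mem_flatten.mpr ⟨cs, hcs, hc⟩
    rw [pv_chunks_flatten, hlf] at hm
    have := List.all_eq_true.mp hbin0 c hm
    simpa using this
  have hmapeq : (pvChunks8 l).map pvParse8 = (pvChunks8 l).map pvSigned8 := by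
    apply List.map_congr_left
    intro cs hcs
    exact (pv_parse8_bin cs (pv_chunks_mem8 l cs hcs) (hbinc cs hcs)).1
  refine Prod.ext ?_ ?_
  swap
  · simpa using (pv_llrA_eq l).trans hmapeq
  -- codewords
  simp only
  by_cases hn : n + 1 ≤ 1
  · rw [PySem.List.pyRange_one_eq_nil hn]
    simp [PySem.List.enumerate_nil]
  -- 0 ≤ n
  have hn0 : 0 ≤ n := by omega
  have hhard : (PySem.List.pyRange 1 (n + 1) 1).foldl
      (fun acc i => acc ++ [pvHard (PySem.List.pyGetD (pvLlrA l) i 0)]) []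
      = (PySem.List.pyRange 1 (n + 1) 1).map
        (fun i => if PySem.List.pyGetD (PySem.List.pyGetD (pvChunks8 l) i []) 0 ' ' = '1'
          then (1 : Int) else 0) := by
    rw [PySem.List.foldl_append_singleton_eq_map]
    simp only [List.nil_append]
    apply List.map_congr_left
    intro i hi
    obtain ⟨hi1, hi2⟩ := PySem.List.mem_pyRange_one.mp hi
    have h0i : 0 ≤ i := by omega
    have hilt : i < ((pvChunks8 l).length : Int) := by omega
    have hgc : PySem.List.pyGetD (pvChunks8 l) i [] = (pvChunks8 l)[i.toNat] :=
      PySem.List.pyGetD_eq_getElem _ _ h0i hilt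
    have hilt' : i < (((pvChunks8 l).map pvParse8).length : Int) := by
      simpa using hilt
    have hgl : PySem.List.pyGetD (pvLlrA l) i 0 = pvParse8 ((pvChunks8 l)[i.toNat]) := by
      rw [pv_llrA_eq l, PySem.List.pyGetD_eq_getElem _ _ h0i hilt']
      simp only [List.getElem_map]
    have hmem : (pvChunks8 l)[i.toNat] ∈ pvChunks8 l := List.getElem_mem _
    have hsign := (pv_parse8_bin _ (pv_chunks_mem8 l _ hmem) (hbinc _ hmem)).2
    rw [hgl, hgc]
    unfold pvHard
    exact if_congr hsign rfl rfl
  rw [hhard]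
  have hbits : ∀ b ∈ (PySem.List.pyRange 1 (n + 1) 1).map
      (fun i => if PySem.List.pyGetD (PySem.List.pyGetD (pvChunks8 l) i []) 0 ' ' = '1'
        then (1 : Int) else 0), b = 0 ∨ b = 1 := by
    intro b hbmem
    rcases List.mem_map.mp hbmem with ⟨i, _, rfl⟩
    by_cases h : PySem.List.pyGetD (PySem.List.pyGetD (pvChunks8 l) i []) 0 ' ' = '1'
    · simp [h]
    · simp [h]
  have hlen' : ((PySem.List.pyRange 1 (n + 1) 1).map
      (fun i => if PySem.List.pyGetD (PySem.List.pyGetD (pvChunks8 l) i []) 0 ' ' = '1'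
        then (1 : Int) else 0)).length = n.toNat := by
    simp [PySem.List.length_pyRange_one]
  have horf := pv_orfold n _ 0 0 hbits (by rw [hlen']; omega)
  simp only [Nat.cast_zero, zero_mul] at horf
  rw [horf, List.foldl_map]
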